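-- pv_equiv track=rewrite | github.com/piyushshuklaniet/piyushshuklaniet | 09.py | getLowerFirst
-- ===== SOURCE A (Python) =====
-- def getLowerFirst(string):
--     lwr=''
--     upr=''
--     punc=''
--     for ch in string:
--         if ch>='a'and ch<='z':
--             lwr+=ch
--         elif ch>='A' and ch<='Z':
--             upr+=ch
--         else:
--             punc+=ch
--     return lwr+punc+upr
-- ===== SOURCE B (Python) =====
-- def getLowerFirst(string):
--     lwr = ''.join(c for c in string if 'a' <= c <= 'z')
--     upr = ''.join(c for c in string if 'A' <= c <= 'Z')
--     punc = ''.join(c for c in string if not ('a' <= c <= 'z') and not ('A' <= c <= 'Z'))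
--     return lwr + punc + upr
-- ===== Notes on version B (the rewrite author's own statement) =====
-- stated objective: idiomatic
-- what changed: Replaced the single branching loop with three string accumulators by three independent filtered passes (generator comprehensions joined once), concatenated at the end.
import Mathlib
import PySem

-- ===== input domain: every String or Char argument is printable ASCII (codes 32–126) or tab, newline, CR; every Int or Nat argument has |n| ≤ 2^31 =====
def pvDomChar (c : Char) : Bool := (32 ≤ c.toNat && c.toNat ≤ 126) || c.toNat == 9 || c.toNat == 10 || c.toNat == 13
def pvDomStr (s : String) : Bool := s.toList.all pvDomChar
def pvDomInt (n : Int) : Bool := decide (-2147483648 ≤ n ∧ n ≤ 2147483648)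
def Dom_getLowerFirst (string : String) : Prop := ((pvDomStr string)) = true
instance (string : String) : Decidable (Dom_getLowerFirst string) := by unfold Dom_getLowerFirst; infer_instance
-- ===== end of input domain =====

-- B: three independent filtered passes instead of one branching loop with three accumulators (idiomatic decomposition).
-- ===== PORT A =====
-- A's loop: fold over the characters carrying the three growing strings (lwr, upr, punc).
def getLowerFirstLoop (cs : List Char) (lwr upr punc : List Char) : List Char :=
  match cs with
  | [] => lwr ++ punc ++ upr
  | ch :: rest =>
    if 'a' ≤ ch ∧ ch ≤ 'z' then getLowerFirstLoop rest (lwr ++ [ch]) upr punc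
    else if 'A' ≤ ch ∧ ch ≤ 'Z' then getLowerFirstLoop rest lwr (upr ++ [ch]) punc
    else getLowerFirstLoop rest lwr upr (punc ++ [ch])

def getLowerFirst (string : String) : String :=
  String.ofList (getLowerFirstLoop string.toList [] [] [])

-- ===== PORT B =====
def getLowerFirst_alt (string : String) : String :=
  String.ofList
    ((string.toList.filter (fun c => 'a' ≤ c ∧ c ≤ 'z')) ++
     (string.toList.filter (fun c => ¬ ('a' ≤ c ∧ c ≤ 'z') ∧ ¬ ('A' ≤ c ∧ c ≤ 'Z'))) ++
     (string.toList.filter (fun c => 'A' ≤ c ∧ c ≤ 'Z')))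

-- ===== PRECONDITION & SPEC =====
def Spec_getLowerFirst (string : String) (out : String) : Prop := out = getLowerFirst_alt string
instance (string : String) (out : String) : Decidable (Spec_getLowerFirst string out) := by unfold Spec_getLowerFirst; infer_instance

-- ===== CLAIM (what is proved, stated in full; the proofs are below) =====
def Claim_equal_getLowerFirst : Prop := ∀ (string : String), Dom_getLowerFirst string → Spec_getLowerFirst string (getLowerFirst string)

-- ===== LEMMAS AND PROOFS =====
lemma getLowerFirstLoop_eq (cs lwr upr punc : List Char) :
    getLowerFirstLoop cs lwr upr punc =
      (lwr ++ cs.filter (fun c => 'a' ≤ c ∧ c ≤ 'z')) ++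
      (punc ++ cs.filter (fun c => ¬ ('a' ≤ c ∧ c ≤ 'z') ∧ ¬ ('A' ≤ c ∧ c ≤ 'Z'))) ++
      (upr ++ cs.filter (fun c => 'A' ≤ c ∧ c ≤ 'Z')) := by
  induction cs generalizing lwr upr punc with
  | nil => simp [getLowerFirstLoop]
  | cons ch rest ih =>
    by_cases h1 : 'a' ≤ ch ∧ ch ≤ 'z'
    · have hz : 'Z' < ch := lt_of_lt_of_le (by decide) h1.1
      simp [getLowerFirstLoop, h1, ih, hz]
    · by_cases h2 : 'A' ≤ ch ∧ ch ≤ 'Z'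
      · simp [getLowerFirstLoop, h1, h2, ih]
      · rcases not_and_or.mp h1 with ha | ha <;> rcases not_and_or.mp h2 with hb | hb <;>
          simp [getLowerFirstLoop, h1, h2, ih, not_le.mp ha, not_le.mp hb]

-- ===== VERDICT (by name: the statement is the Claim_ definition above) =====
theorem getLowerFirst_spec : Claim_equal_getLowerFirst := by
  intro s _
  unfold Spec_getLowerFirst getLowerFirst getLowerFirst_alt
  rw [getLowerFirstLoop_eq]
  simp
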